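-- pv_equiv track=rewrite | github.com/Alintermans/Thesis | Experiments/ConstrainedParodieGenerator/SongUtils.py | get_perfect_rhyme_ending_from_pron
-- ===== SOURCE A (Python) =====
-- def get_perfect_rhyme_ending_from_pron(pron):
--     index = -1
--
--     for i in reversed(range(len(pron))):
--         if pron[i] != '' and pron[i][-1].isdigit():
--             index = i
--             break
--     if index == -1:
--         return ("")
--     vowel = pron[index][:-1]
--     last_consonants = pron[i+1:] if i+1 < len(pron) else []
--     return [tuple([vowel] + last_consonants)]
-- ===== SOURCE B (Python) =====
-- def get_perfect_rhyme_ending_from_pron(pron):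
--     vowel = None
--     tail = []
--     for p in pron:
--         if p != '' and p[-1].isdigit():
--             vowel = p[:-1]
--             tail = []
--         else:
--             tail.append(p)
--     if vowel is None:
--         return ("")
--     return [tuple([vowel] + tail)]
-- ===== Notes on version B (the rewrite author's own statement) =====
-- stated objective: alternative
-- what changed: Replaces A's reverse index scan with break plus slicing by a single forward fold over the phonemes themselves: the state (vowel, tail) is reset at every stressed phoneme and tail accumulates the consonants after it, so no indices, no reversed range and no slice remain.
-- outside the precondition, e.g. on get_perfect_rhyme_ending_from_pron([]): A returns '', B returns ''; on get_perfect_rhyme_ending_from_pron(['K', 'T']): A returns '', B returns ''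
import Mathlib
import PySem

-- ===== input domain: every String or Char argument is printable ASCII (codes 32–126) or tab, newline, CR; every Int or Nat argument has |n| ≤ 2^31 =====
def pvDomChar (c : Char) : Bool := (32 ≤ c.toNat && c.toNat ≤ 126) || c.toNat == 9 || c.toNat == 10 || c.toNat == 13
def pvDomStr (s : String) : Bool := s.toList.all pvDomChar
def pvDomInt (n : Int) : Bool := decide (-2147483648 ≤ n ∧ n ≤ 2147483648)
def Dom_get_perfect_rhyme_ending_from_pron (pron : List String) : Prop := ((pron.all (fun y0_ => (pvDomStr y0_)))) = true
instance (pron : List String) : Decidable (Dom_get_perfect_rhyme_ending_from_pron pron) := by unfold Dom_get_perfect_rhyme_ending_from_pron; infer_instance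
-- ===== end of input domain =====

-- B replaces A's reverse index scan with break (and its slicing) by one forward fold whose
-- state (vowel, tail) is reset at each stressed phoneme; objective: alternative (same cost).


-- ===== PORT A =====
-- predicate for Python "p != '' and p[-1].isdigit()" (exact: pyGet? s (-1) = last char)
def pvStressed (s : String) : Bool :=
  (s != "") && ((PySem.Str.pyGet? s (-1)).map PySem.Chars.isdigit).getD false

-- the reverse-range loop with break: first index (scanning the given index list) that is stressed, else -1
def pvLoopA (pron : List String) : List Int → Int
  | [] => -1
  | i :: rest =>
      if pvStressed (PySem.List.pyGetD pron i "") then i else pvLoopA pron rest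

def get_perfect_rhyme_ending_from_pron (pron : List String) : List (List String) :=
  let index := pvLoopA pron ((PySem.List.pyRange 0 pron.length 1).reverse)
  if index = -1 then []   -- Python returns "" (a str, not a list) here; excluded by Pre_
  else
    let vowel := PySem.Str.slice (PySem.List.pyGetD pron index "") none (some (-1))
    let last_consonants :=
      if index + 1 < (pron.length : Int) then PySem.List.slice pron (some (index + 1)) none else []
    [vowel :: last_consonants]

-- ===== PORT B =====
-- fold step: reset (vowel, tail) at a stressed phoneme, otherwise append to tail
def pvStepB (st : Option String × List String) (p : String) : Option String × List String :=
  if pvStressed p then (some (PySem.Str.slice p none (some (-1))), [])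
  else (st.1, st.2 ++ [p])

def get_perfect_rhyme_ending_from_pron_alt (pron : List String) : List (List String) :=
  let st := pron.foldl pvStepB ((none : Option String), ([] : List String))
  match st.1 with
  | none => []            -- Python returns "" here; excluded by Pre_
  | some v => [v :: st.2]

-- ===== PRECONDITION & SPEC =====
-- Pre_ excludes exactly the inputs with no stressed phoneme, where Python A (and B) return the
-- string "" instead of a value of the declared list type.
def Pre_get_perfect_rhyme_ending_from_pron (pron : List String) : Prop :=
  (pron.any pvStressed) = true
instance (pron : List String) : Decidable (Pre_get_perfect_rhyme_ending_from_pron pron) := by unfold Pre_get_perfect_rhyme_ending_from_pron; infer_instance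

def pvWitness_get_perfect_rhyme_ending_from_pron : List String := ["K", "AH0", "T"]

def Spec_get_perfect_rhyme_ending_from_pron (pron : List String) (out : List (List String)) : Prop := out = get_perfect_rhyme_ending_from_pron_alt pron
instance (pron : List String) (out : List (List String)) : Decidable (Spec_get_perfect_rhyme_ending_from_pron pron out) := by unfold Spec_get_perfect_rhyme_ending_from_pron; infer_instance

-- ===== CLAIM =====
def Claim_equal_get_perfect_rhyme_ending_from_pron : Prop := ∀ (pron : List String), Dom_get_perfect_rhyme_ending_from_pron pron → Pre_get_perfect_rhyme_ending_from_pron pron → Spec_get_perfect_rhyme_ending_from_pron pron (get_perfect_rhyme_ending_from_pron pron)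

-- ===== LEMMAS AND PROOFS =====

def pvVowel (s : String) : String := PySem.Str.slice s none (some (-1))

-- stressed positions of pron as natural indices, in increasing order
def pvNatIdx (pron : List String) : List Nat :=
  (List.range pron.length).filter (fun k => pvStressed (pron.getD k ""))

-- reference recursion: result of the rightmost stressed phoneme, carrying the real tail
def pvSpecRec : List String → Option (String × List String)
  | [] => none
  | h :: t =>
      match pvSpecRec t with
      | some r => some r
      | none => if pvStressed h then some (pvVowel h, t) else none

theorem pvLoopA_eq_find? (pron : List String) (l : List Int) :
    pvLoopA pron l = ((l.find? (fun i => pvStressed (PySem.List.pyGetD pron i ""))).getD (-1)) := by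
  induction l with
  | nil => rfl
  | cons i rest ih =>
      simp only [pvLoopA, List.find?]
      by_cases h : pvStressed (PySem.List.pyGetD pron i "") = true
      · simp [h]
      · simp [h, ih]

theorem find?_eq_head?_filter {α : Type} (p : α → Bool) (l : List α) :
    l.find? p = (l.filter p).head? := by
  induction l with
  | nil => rfl
  | cons a l ih =>
      cases h : p a with
      | true => rw [List.find?_cons_of_pos h, List.filter_cons_of_pos h, List.head?_cons]
      | false => rw [List.find?_cons_of_neg (by simp [h]), List.filter_cons_of_neg (by simp [h]), ih]

-- the Int-index filtered range is the Nat-index one, cast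
theorem intIdx_eq (pron : List String) :
    (PySem.List.pyRange 0 pron.length 1).filter
        (fun i => pvStressed (PySem.List.pyGetD pron i ""))
      = (pvNatIdx pron).map (fun (k : Nat) => (k : Int)) := by
  rw [PySem.List.pyRange_zero_nat, List.filter_map, pvNatIdx]
  simp only [Function.comp_def, PySem.List.pyGetD_natCast]

-- A's result, characterised through the last stressed natural index
theorem A_char (pron : List String) :
    get_perfect_rhyme_ending_from_pron pron
      = match (pvNatIdx pron).getLast? with
        | none => []
        | some k => [pvVowel (pron.getD k "") :: pron.drop (k + 1)] := by
  unfold get_perfect_rhyme_ending_from_pron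
  rw [pvLoopA_eq_find?, find?_eq_head?_filter, List.filter_reverse, List.head?_reverse, intIdx_eq,
     List.getLast?_map]
  cases hlast : (pvNatIdx pron).getLast? with
  | none => simp
  | some k =>
      have hmem : k ∈ pvNatIdx pron := List.mem_of_getLast? hlast
      have hk : k < pron.length := by
        have := List.mem_range.mp (List.mem_of_mem_filter hmem)
        exact this
      have hne : ((k : Int)) ≠ -1 := by omega
      simp only [Option.map_some, Option.getD_some, if_neg hne]
      have hslice : PySem.List.slice pron (some ((k : Int) + 1)) none = pron.drop (k + 1) := by
        rw [PySem.List.slice_from pron (by omega)]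
        congr 1
        try omega
      by_cases hlt : (k : Int) + 1 < (pron.length : Int)
      · simp [hlt, hslice, pvVowel]
      · have hdrop : pron.drop (k + 1) = [] := List.drop_eq_nil_of_le (by omega)
        simp [hlt, hdrop, pvVowel]

-- the reference recursion, characterised the same way
theorem pvSpecRec_char (pron : List String) :
    pvSpecRec pron
      = ((pvNatIdx pron).getLast?).map
          (fun k => (pvVowel (pron.getD k ""), pron.drop (k + 1))) := by
  induction pron with
  | nil => rfl
  | cons h t ih =>
      have hidx : pvNatIdx (h :: t)
          = (if pvStressed h then [0] else []) ++ (pvNatIdx t).map (· + 1) := by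
        unfold pvNatIdx
        rw [List.length_cons, List.range_succ_eq_map, List.filter_cons, List.filter_map]
        by_cases hs : pvStressed h = true <;>
          simp [hs, Function.comp_def, Nat.succ_eq_add_one]
      simp only [pvSpecRec, ih, hidx]
      cases hT : (pvNatIdx t).getLast? with
      | none =>
          have : pvNatIdx t = [] := List.getLast?_eq_none_iff.mp hT
          simp only [this, List.map_nil, List.append_nil, Option.map_none]
          by_cases hs : pvStressed h = true
          · simp [hs]
          · simp [hs]
      | some k =>
          have hne : (pvNatIdx t).map (· + 1) ≠ [] := by
            intro hcontra
            rw [List.map_eq_nil_iff] at hcontra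
            simp [hcontra] at hT
          rw [List.getLast?_append_of_ne_nil _ hne, List.getLast?_map, hT]
          simp

-- the fold computes the reference recursion (generalised over the start state)
theorem foldB_eq (xs : List String) :
    ∀ st : Option String × List String,
      xs.foldl pvStepB st
        = match pvSpecRec xs with
          | some (v, t) => (some v, t)
          | none => (st.1, st.2 ++ xs) := by
  induction xs with
  | nil => intro st; simp [pvSpecRec]
  | cons h t ih =>
      intro st
      rw [List.foldl_cons, ih]
      cases hT : pvSpecRec t with
      | some r => simp [pvSpecRec, hT]
      | none =>
          by_cases hs : pvStressed h = true
          · simp [pvSpecRec, hT, hs, pvStepB, pvVowel]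
          · simp [pvSpecRec, hT, hs, pvStepB]

theorem get_perfect_rhyme_ending_from_pron_spec : Claim_equal_get_perfect_rhyme_ending_from_pron := by
  intro pron _ _
  show get_perfect_rhyme_ending_from_pron pron = get_perfect_rhyme_ending_from_pron_alt pron
  rw [A_char]
  unfold get_perfect_rhyme_ending_from_pron_alt
  rw [foldB_eq, pvSpecRec_char]
  cases hlast : (pvNatIdx pron).getLast? with
  | none => simp
  | some k => simp
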